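-- pv_equiv track=rewrite | github.com/jorlyf/ege-informatics | 22 задание/3.py | f
-- ===== SOURCE A (Python) =====
-- def f(x):
--     a = 0
--     b = 0
--     while x > 0:
--         a = a + 1
--         b = b + (x % 10)
--         x = x // 10
--     return a, b
-- ===== SOURCE B (Python) =====
-- def f(x):
--     s = str(x) if x > 0 else ""
--     digits = [int(c) for c in s]
--     return len(digits), sum(digits)
-- ===== Notes on version B (the rewrite author's own statement) =====
-- stated objective: idiomatic
-- what changed: B reads the digits from the decimal string form str(x) (len and sum of the digit list) instead of A's while-loop that extracts digits arithmetically with modulus and floor division.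
import Mathlib
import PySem

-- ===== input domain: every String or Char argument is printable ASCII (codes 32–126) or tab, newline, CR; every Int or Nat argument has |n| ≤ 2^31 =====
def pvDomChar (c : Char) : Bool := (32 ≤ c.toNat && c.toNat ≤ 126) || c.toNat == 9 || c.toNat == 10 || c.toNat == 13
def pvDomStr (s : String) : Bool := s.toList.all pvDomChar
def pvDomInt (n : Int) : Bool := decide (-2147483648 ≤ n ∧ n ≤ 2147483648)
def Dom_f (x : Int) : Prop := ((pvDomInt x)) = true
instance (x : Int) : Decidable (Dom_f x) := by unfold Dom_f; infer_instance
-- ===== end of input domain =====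

-- B reads the digits from the decimal string str(x) (len and sum of the digit list)
-- instead of A's arithmetic % 10 / // 10 extraction loop (objective: idiomatic, same cost).

-- ===== PORT A =====
-- the while loop: state (a, b, x)
def fLoop (a b x : Int) : Int × Int :=
  if h : 0 < x then
    fLoop (a + 1) (b + PySem.Int.mod x 10) (PySem.Int.floordiv x 10)
  else (a, b)
termination_by x.toNat
decreasing_by
  exact (Int.toNat_lt_toNat h).mpr
    ((PySem.Int.floordiv_lt_iff_lt_mul (by norm_num : (0:Int) < 10)).mpr
      (by nlinarith))

def f (x : Int) : Int × Int := fLoop 0 0 x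

-- ===== PORT B =====
def f_alt (x : Int) : Int × Int :=
  let s : String := if 0 < x then PySem.Int.toStr x else ""
  -- int(c): each c is one character of str(x); always a decimal digit here, so int(c) never raises
  let digits : List Int := s.toList.map (fun c => (PySem.Int.ofChars? [c]).getD 0)
  ((digits.length : Int), digits.foldl (· + ·) 0)

-- ===== PRECONDITION & SPEC =====
def Spec_f (x : Int) (out : Int × Int) : Prop := out = f_alt x
instance (x : Int) (out : Int × Int) : Decidable (Spec_f x out) := by unfold Spec_f; infer_instance

-- ===== CLAIM (what is proved, stated in full; the proofs are below) =====
def Claim_equal_f : Prop := ∀ (x : Int), Dom_f x → Spec_f x (f x)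

-- ===== LEMMAS AND PROOFS =====

-- the digit value B extracts from one character
def pvVal (c : Char) : Int := (PySem.Int.ofChars? [c]).getD 0

theorem pvVal_digitChar (d : Nat) (hd : d < 10) : pvVal (Nat.digitChar d) = (d : Int) := by
  interval_cases d <;> decide

theorem toDigitsCore_shift (n : Nat) : ∀ (fuel : Nat) (acc : List Char), n < fuel →
    Nat.toDigitsCore 10 fuel n acc = Nat.toDigits 10 n ++ acc := by
  induction n using Nat.strong_induction_on with
  | _ n ih =>
    intro fuel acc hf
    match fuel, hf with
    | fuel + 1, hf =>
      by_cases h0 : n / 10 = 0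
      · simp [Nat.toDigitsCore, Nat.toDigits, h0]
      · have hn10 : 0 < n := by omega
        have hdivlt : n / 10 < n := Nat.div_lt_self hn10 (by norm_num)
        have e1 : Nat.toDigitsCore 10 (fuel + 1) n acc
            = Nat.toDigitsCore 10 fuel (n / 10) (Nat.digitChar (n % 10) :: acc) := by
          rw [Nat.toDigitsCore]
          obtain ⟨m, hm⟩ := Nat.exists_eq_succ_of_ne_zero h0
          simp [hm]
        have e2 : Nat.toDigits 10 n
            = Nat.toDigitsCore 10 n (n / 10) [Nat.digitChar (n % 10)] := by
          rw [Nat.toDigits, Nat.toDigitsCore]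
          obtain ⟨m, hm⟩ := Nat.exists_eq_succ_of_ne_zero h0
          simp [hm]
        rw [e1, ih (n / 10) hdivlt fuel _ (by omega), e2,
            ih (n / 10) hdivlt n _ (by omega)]
        simp

theorem toDigits_small (n : Nat) (h2 : n < 10) :
    Nat.toDigits 10 n = [Nat.digitChar n] := by
  rw [Nat.toDigits, Nat.toDigitsCore]
  simp [Nat.div_eq_of_lt h2, Nat.mod_eq_of_lt h2]

theorem toDigits_step (n : Nat) (h : 10 ≤ n) :
    Nat.toDigits 10 n = Nat.toDigits 10 (n / 10) ++ [Nat.digitChar (n % 10)] := by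
  have h0 : n / 10 ≠ 0 := by omega
  have e2 : Nat.toDigits 10 n
      = Nat.toDigitsCore 10 n (n / 10) [Nat.digitChar (n % 10)] := by
    rw [Nat.toDigits, Nat.toDigitsCore]
    obtain ⟨m, hm⟩ := Nat.exists_eq_succ_of_ne_zero h0
    simp [hm]
  rw [e2, toDigitsCore_shift (n / 10) n _ (by have := Nat.div_lt_self (by omega : 0 < n) (by norm_num : 1 < 10); omega)]

theorem mod_cast10 (n : Nat) : PySem.Int.mod (n : Int) 10 = ((n % 10 : Nat) : Int) := by
  simp [PySem.Int.mod, Int.fmod_eq_emod]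

theorem floordiv_cast10 (n : Nat) : PySem.Int.floordiv (n : Int) 10 = ((n / 10 : Nat) : Int) := by
  simp [PySem.Int.floordiv, Int.fdiv_eq_ediv]

theorem fLoop_eq (n : Nat) (hn : 0 < n) : ∀ (a b : Int),
    fLoop a b (n : Int) = (a + ((Nat.toDigits 10 n).length : Int),
                           b + ((Nat.toDigits 10 n).map pvVal).sum) := by
  induction n using Nat.strong_induction_on with
  | _ n ih =>
    intro a b
    rw [fLoop]
    simp only [dif_pos (by exact_mod_cast hn : (0:Int) < (n:Int))]
    rw [mod_cast10, floordiv_cast10]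
    by_cases h : n < 10
    · have h0 : n / 10 = 0 := Nat.div_eq_of_lt h
      rw [h0]
      rw [fLoop]
      simp [toDigits_small n h, pvVal_digitChar n h, Nat.mod_eq_of_lt h]
    · have hstep := toDigits_step n (by omega)
      have hdivlt : n / 10 < n := Nat.div_lt_self hn (by norm_num)
      rw [ih (n / 10) hdivlt (by omega)]
      rw [hstep]
      simp [pvVal_digitChar (n % 10) (Nat.mod_lt n (by norm_num))]
      constructor <;> ring

theorem f_alt_pos (x : Int) (hx : 0 < x) :
    f_alt x = (((Nat.toDigits 10 x.toNat).length : Int),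
               ((Nat.toDigits 10 x.toNat).map pvVal).sum) := by
  unfold f_alt
  simp only [if_pos hx]
  have hchars : (PySem.Int.toStr x).toList = Nat.toDigits 10 x.toNat := by
    rw [PySem.Int.toList_toStr, PySem.Int.toChars]
    simp [Int.not_lt.mpr (le_of_lt hx)]
  rw [hchars, Prod.mk.injEq]
  refine ⟨by simp, ?_⟩
  rw [← List.sum_eq_foldl]
  rfl

-- ===== VERDICT (by name: the statement is the Claim_ definition above) =====
theorem f_spec : Claim_equal_f := by
  intro x _
  unfold Spec_f f
  by_cases hx : 0 < x
  · obtain ⟨n, rfl⟩ := Int.eq_ofNat_of_zero_le (le_of_lt hx)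
    rw [f_alt_pos _ hx, fLoop_eq n (by exact_mod_cast hx) 0 0]
    simp
  · rw [fLoop, f_alt]
    simp [dif_neg hx, if_neg hx]
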